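-- pv_equiv track=rewrite | github.com/Schoyen/compound-indices | tests/helpers/utils.py | ind_gen
-- ===== SOURCE A (Python) =====
-- def ind_gen(start, n, k, kind="d"):
--     assert kind in ["d", "a", "s"]
--     assert start >= 0
--     assert n >= k
--     assert k > 0
--
--     if k == 1:
--         for i in range(start, n):
--             yield [i]
--         return
--
--     for i in range(start, n):
--         start_der = 0
--
--         if kind == "a":
--             start_der = i + 1
--         elif kind == "s":
--             start_der = i
--
--         for s_ind in ind_gen(start_der, n, k - 1, kind=kind):
--             yield [i] + s_ind
-- ===== SOURCE B (Python) =====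
-- def ind_gen(start, n, k, kind="d"):
--     assert kind in ["d", "a", "s"]
--     assert start >= 0
--     assert n >= k
--     assert k > 0
--
--     def combos(pool, r):
--         # choose r strictly increasing elements: include or skip the pool head
--         if r == 0:
--             yield []
--             return
--         if not pool:
--             return
--         head, rest = pool[0], pool[1:]
--         for tail in combos(rest, r - 1):
--             yield [head] + tail
--         yield from combos(rest, r)
--
--     def cwr(pool, r):
--         # choose r non-decreasing elements: reuse or skip the pool head
--         if r == 0:
--             yield []
--             return
--         if not pool:
--             return
--         for tail in cwr(pool, r - 1):
--             yield [pool[0]] + tail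
--         yield from cwr(pool[1:], r)
--
--     def prod(pool, r):
--         if r == 0:
--             yield []
--             return
--         for x in pool:
--             for tail in prod(pool, r - 1):
--                 yield [x] + tail
--
--     pool = list(range(start, n))
--     if kind == "a":
--         yield from combos(pool, k)
--     elif kind == "s":
--         yield from cwr(pool, k)
--     else:
--         full = list(range(n))
--         for first in pool:
--             for rest in prod(full, k - 1):
--                 yield [first] + rest
-- ===== Notes on version B (the rewrite author's own statement) =====
-- stated objective: alternative
-- what changed: B dispatches once on kind and enumerates via structural recursion on the candidate pool (include/skip-head for combinations, reuse/skip-head for combinations-with-replacement, and a cartesian product for 'd'), instead of A's single recursion on k re-entered with a per-kind start offset at every level.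
import Mathlib
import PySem

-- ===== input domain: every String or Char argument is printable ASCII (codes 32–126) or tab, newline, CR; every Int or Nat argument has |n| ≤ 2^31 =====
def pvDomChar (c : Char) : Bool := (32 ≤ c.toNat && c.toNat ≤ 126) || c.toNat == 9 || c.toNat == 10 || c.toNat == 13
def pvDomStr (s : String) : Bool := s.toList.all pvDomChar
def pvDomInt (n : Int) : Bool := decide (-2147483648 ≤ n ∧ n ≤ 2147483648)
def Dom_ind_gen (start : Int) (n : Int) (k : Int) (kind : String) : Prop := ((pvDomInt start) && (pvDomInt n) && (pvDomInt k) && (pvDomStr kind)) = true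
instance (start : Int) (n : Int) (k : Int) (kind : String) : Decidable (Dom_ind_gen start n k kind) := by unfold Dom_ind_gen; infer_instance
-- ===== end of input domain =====

-- B replaces A's recursion on k (with per-kind start offsets) by a one-time dispatch on kind
-- and pool-structural recursion per kind; same outputs in the same order ("alternative").

-- ===== PORT A =====
-- A's generator collected into a list; A recurses on k - 1, so the Nat fuel is k itself (k > 0 inside Pre_).
def indGenA (start : Int) (n : Int) (k : Nat) (kind : String) : List (List Int) :=
  match k with
  | 0 => []
  | 1 => (PySem.List.pyRange start n 1).map (fun i => [i])
  | Nat.succ (Nat.succ m) =>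
    (PySem.List.pyRange start n 1).flatMap (fun i =>
      let start_der : Int := if kind == "a" then i + 1 else if kind == "s" then i else 0
      (indGenA start_der n (Nat.succ m) kind).map (fun s => i :: s))

def ind_gen (start : Int) (n : Int) (k : Int) (kind : String) : List (List Int) :=
  indGenA start n k.toNat kind

-- ===== PORT B =====
-- combos: include the pool head (and pick r-1 from the rest) or skip the head
def pvCombos (pool : List Int) (r : Nat) : List (List Int) :=
  match pool, r with
  | _, 0 => [[]]
  | [], _ + 1 => []
  | x :: rest, Nat.succ m =>
      (pvCombos rest m).map (fun t => x :: t) ++ pvCombos rest (Nat.succ m)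

-- cwr: reuse the pool head (pool unchanged, r-1) or skip the head
def pvCwr (pool : List Int) (r : Nat) : List (List Int) :=
  match pool, r with
  | _, 0 => [[]]
  | [], _ + 1 => []
  | x :: rest, Nat.succ m =>
      (pvCwr (x :: rest) m).map (fun t => x :: t) ++ pvCwr rest (Nat.succ m)
termination_by (pool.length, r)

def pvProd (pool : List Int) (r : Nat) : List (List Int) :=
  match r with
  | 0 => [[]]
  | Nat.succ m => pool.flatMap (fun x => (pvProd pool m).map (fun t => x :: t))

def ind_gen_alt (start : Int) (n : Int) (k : Int) (kind : String) : List (List Int) :=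
  let pool := PySem.List.pyRange start n 1
  if kind == "a" then pvCombos pool k.toNat
  else if kind == "s" then pvCwr pool k.toNat
  else
    let full := PySem.List.pyRange 0 n 1
    pool.flatMap (fun first => (pvProd full (k.toNat - 1)).map (fun rest => first :: rest))

-- ===== PRECONDITION & SPEC =====
-- Exactly A's asserts: outside them the Python generator raises AssertionError on first iteration.
def Pre_ind_gen (start : Int) (n : Int) (k : Int) (kind : String) : Prop :=
  (kind = "d" ∨ kind = "a" ∨ kind = "s") ∧ 0 ≤ start ∧ k ≤ n ∧ 0 < k
instance (start : Int) (n : Int) (k : Int) (kind : String) : Decidable (Pre_ind_gen start n k kind) := by unfold Pre_ind_gen; infer_instance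
def pvWitness_ind_gen : Int × Int × Int × String := (0, 3, 2, "d")

def Spec_ind_gen (start : Int) (n : Int) (k : Int) (kind : String) (out : List (List Int)) : Prop := out = ind_gen_alt start n k kind
instance (start : Int) (n : Int) (k : Int) (kind : String) (out : List (List Int)) : Decidable (Spec_ind_gen start n k kind out) := by unfold Spec_ind_gen; infer_instance

-- ===== CLAIM (what is proved, stated in full; the proofs are below) =====
def Claim_equal_ind_gen : Prop := ∀ (start : Int) (n : Int) (k : Int) (kind : String), Dom_ind_gen start n k kind → Pre_ind_gen start n k kind → Spec_ind_gen start n k kind (ind_gen start n k kind)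

-- ===== LEMMAS AND PROOFS =====

theorem pvCombos_one (pool : List Int) : pvCombos pool 1 = pool.map (fun x => [x]) := by
  induction pool with
  | nil => rfl
  | cons x rest ih => simp [pvCombos, ih]

theorem pvCwr_one (pool : List Int) : pvCwr pool 1 = pool.map (fun x => [x]) := by
  induction pool with
  | nil => simp [pvCwr]
  | cons x rest ih => simp [pvCwr, ih]

theorem flatMap_singleton_pair (l : List Int) :
    l.flatMap (fun i => [[i]]) = l.map (fun i => [i]) := by
  induction l with
  | nil => rfl
  | cons x rest ih => simp [List.flatMap_cons, ih]

-- kind = "a": A's recursion equals include/skip-head combinations of range(start, n)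
theorem indGenA_a (m : Nat) : ∀ (j : Nat) (start n : Int), (n - start).toNat ≤ j →
    indGenA start n (m + 1) "a" = pvCombos (PySem.List.pyRange start n 1) (m + 1) := by
  induction m with
  | zero =>
    intro j start n _
    rw [indGenA, pvCombos_one]
  | succ m ih =>
    intro j
    induction j with
    | zero =>
      intro start n h
      have hle : n ≤ start := by omega
      rw [indGenA]
      rw [PySem.List.pyRange_one_eq_nil hle]
      rfl
    | succ j ihj =>
      intro start n h
      by_cases hlt : start < n
      · have hc := PySem.List.pyRange_one_cons hlt
        have htail : (PySem.List.pyRange (start + 1) n 1).flatMap (fun i =>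
            let start_der : Int := if "a" == "a" then i + 1 else if "a" == "s" then i else 0
            (indGenA start_der n (Nat.succ m) "a").map (fun s => i :: s))
            = indGenA (start + 1) n (m + 1 + 1) "a" := by rw [indGenA]
        rw [indGenA, hc, List.flatMap_cons, htail, ihj (start + 1) n (by omega)]
        show (indGenA (start + 1) n (m + 1) "a").map (fun s => start :: s) ++
            pvCombos (PySem.List.pyRange (start + 1) n 1) (m + 1 + 1) = _
        rw [ih (n - (start + 1)).toNat (start + 1) n (le_refl _)]
        rfl
      · have hle : n ≤ start := by omega
        rw [indGenA]
        rw [PySem.List.pyRange_one_eq_nil hle]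
        rfl

-- kind = "s": A's recursion equals reuse/skip-head combinations-with-replacement
theorem indGenA_s (m : Nat) : ∀ (j : Nat) (start n : Int), (n - start).toNat ≤ j →
    indGenA start n (m + 1) "s" = pvCwr (PySem.List.pyRange start n 1) (m + 1) := by
  induction m with
  | zero =>
    intro j start n _
    rw [indGenA, pvCwr_one]
  | succ m ih =>
    intro j
    induction j with
    | zero =>
      intro start n h
      have hle : n ≤ start := by omega
      rw [indGenA]
      rw [PySem.List.pyRange_one_eq_nil hle]
      simp [pvCwr]
    | succ j ihj =>
      intro start n h
      by_cases hlt : start < n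
      · have hc := PySem.List.pyRange_one_cons hlt
        have htail : (PySem.List.pyRange (start + 1) n 1).flatMap (fun i =>
            let start_der : Int := if "s" == "a" then i + 1 else if "s" == "s" then i else 0
            (indGenA start_der n (Nat.succ m) "s").map (fun s => i :: s))
            = indGenA (start + 1) n (m + 1 + 1) "s" := by rw [indGenA]
        rw [indGenA, hc, List.flatMap_cons, htail, ihj (start + 1) n (by omega)]
        show (indGenA start n (m + 1) "s").map (fun s => start :: s) ++
            pvCwr (PySem.List.pyRange (start + 1) n 1) (m + 1 + 1) = _
        rw [ih (n - start).toNat start n (le_refl _), hc]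
        simp [pvCwr]
      · have hle : n ≤ start := by omega
        rw [indGenA]
        rw [PySem.List.pyRange_one_eq_nil hle]
        simp [pvCwr]

-- kind = "d", inner levels: A's recursion from start 0 equals the cartesian product
theorem indGenA_d_prod (m : Nat) (n : Int) :
    indGenA 0 n (m + 1) "d" = pvProd (PySem.List.pyRange 0 n 1) (m + 1) := by
  induction m with
  | zero =>
    rw [indGenA]
    rw [show pvProd (PySem.List.pyRange 0 n 1) 1
        = (PySem.List.pyRange 0 n 1).flatMap (fun i => [[i]]) from rfl]
    rw [flatMap_singleton_pair]
  | succ m ih =>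
    rw [indGenA, pvProd]
    simp only [show (("d" : String) == "a") = false from rfl,
               show (("d" : String) == "s") = false from rfl, Bool.false_eq_true, if_false]
    rw [ih]

-- ===== VERDICT (by name: the statement is the Claim_ definition above) =====
theorem ind_gen_spec : Claim_equal_ind_gen := by
  intro start n k kind _ hpre
  obtain ⟨hkind, _, _, hk⟩ := hpre
  obtain ⟨m, hm⟩ : ∃ m : Nat, k.toNat = m + 1 := ⟨k.toNat - 1, by omega⟩
  unfold Spec_ind_gen ind_gen ind_gen_alt
  rw [hm]
  rcases hkind with h | h | h <;> subst h
  · -- kind = "d"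
    simp only [show (("d" : String) == "a") = false from rfl,
               show (("d" : String) == "s") = false from rfl, Bool.false_eq_true, if_false,
               Nat.add_sub_cancel]
    cases m with
    | zero =>
      rw [indGenA]
      exact (flatMap_singleton_pair _).symm
    | succ m =>
      rw [indGenA]
      simp only [show (("d" : String) == "a") = false from rfl,
                 show (("d" : String) == "s") = false from rfl, Bool.false_eq_true, if_false]
      rw [indGenA_d_prod]
  · -- kind = "a"
    simp only [show (("a" : String) == "a") = true from rfl, if_pos]
    exact indGenA_a m (n - start).toNat start n (le_refl _)
  · -- kind = "s"
    simp only [show (("s" : String) == "a") = false from rfl,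
               show (("s" : String) == "s") = true from rfl, Bool.false_eq_true, if_false, if_pos]
    exact indGenA_s m (n - start).toNat start n (le_refl _)
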